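-- pv_equiv track=rewrite | github.com/reshinto/social-research-probe | social_research_probe/utils/narratives/clusterer.py | _merge_singletons
-- ===== SOURCE A (Python) =====
-- def _merge_singletons(groups: list[list[dict]], min_size: int) -> list[list[dict]]:
--     """Merge groups below min_size into nearest large group by entity overlap."""
--     large = [g for g in groups if len(g) >= min_size]
--     small = [g for g in groups if len(g) < min_size]
--
--     if not large and small:
--         all_small_claims = [c for g in small for c in g]
--         return [all_small_claims] if all_small_claims else []
--
--     for group in small:
--         for claim in group:
--             best_overlap = -1
--             best_idx = 0
--             claim_entities = {e.lower() for e in claim.get("entities") or []}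
--             for i, lg in enumerate(large):
--                 group_entities = {e.lower() for c in lg for e in (c.get("entities") or [])}
--                 overlap = len(claim_entities & group_entities)
--                 if overlap > best_overlap:
--                     best_overlap = overlap
--                     best_idx = i
--             large[best_idx].append(claim)
--
--     return large
-- ===== SOURCE B (Python) =====
-- def _merge_singletons(groups: list[list[dict]], min_size: int) -> list[list[dict]]:
--     """Merge groups below min_size into nearest large group by entity overlap.
--
--     Inverted-index variant: a dict maps each lowercased entity to the set of
--     large-group indices whose entity set contains it; per-claim overlaps are
--     tallied from the index instead of rebuilding every group's entity set.
--     """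
--     large = [g for g in groups if len(g) >= min_size]
--     small = [g for g in groups if len(g) < min_size]
--
--     if not large and small:
--         all_small_claims = [c for g in small for c in g]
--         return [all_small_claims] if all_small_claims else []
--
--     # inverted index: lowercased entity -> set of indices of large groups containing it
--     index: dict[str, set[int]] = {}
--     for i, g in enumerate(large):
--         for c in g:
--             for e in c.get("entities") or []:
--                 index.setdefault(e.lower(), set()).add(i)
--
--     for claim in (c for g in small for c in g):
--         # large is non-empty here: a small claim exists, so the early return did not fire
--         ents = {e.lower() for e in claim.get("entities") or []}
--         counts = [0] * len(large)
--         for e in ents: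
--             for i in index.get(e, ()):
--                 counts[i] += 1
--         best_idx = counts.index(max(counts))
--         large[best_idx].append(claim)
--         for e in ents:
--             index.setdefault(e, set()).add(best_idx)
--
--     return large
-- ===== Notes on version B (the rewrite author's own statement) =====
-- stated objective: alternative
-- what changed: B builds an inverted index (dict from lowercased entity to the set of large-group indices containing it) once and tallies per-claim overlap counts by index lookup, choosing the first maximal count, instead of A's rebuilding every large group's full entity set for every claim; the index is updated as claims are appended.
import Mathlib
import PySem

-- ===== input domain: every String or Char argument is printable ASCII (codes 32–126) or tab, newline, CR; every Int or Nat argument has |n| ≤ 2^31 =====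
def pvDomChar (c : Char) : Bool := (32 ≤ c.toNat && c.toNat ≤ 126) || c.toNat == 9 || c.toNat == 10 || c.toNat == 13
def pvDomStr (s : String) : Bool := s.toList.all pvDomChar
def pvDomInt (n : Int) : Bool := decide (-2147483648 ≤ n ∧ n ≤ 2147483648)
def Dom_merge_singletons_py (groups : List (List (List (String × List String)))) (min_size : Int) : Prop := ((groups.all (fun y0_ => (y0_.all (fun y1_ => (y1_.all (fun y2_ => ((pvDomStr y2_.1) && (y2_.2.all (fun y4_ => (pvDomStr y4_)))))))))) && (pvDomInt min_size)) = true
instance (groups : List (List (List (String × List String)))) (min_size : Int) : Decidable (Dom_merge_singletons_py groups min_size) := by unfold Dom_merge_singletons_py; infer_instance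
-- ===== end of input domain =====

-- B replaces A's per-claim rebuild of every large group's entity set by an inverted index
-- (lowercased entity -> set of large-group indices), tallying overlap counts by lookup
-- (objective: alternative). Both Pythons append claims into the caller's inner group lists;
-- the equivalence proved here is about the RETURN value only.

-- shared helper: claim.get("entities") or []  (both Pythons contain this expression)
def pvEntsOf (c : List (String × List String)) : List String :=
  PySem.Dict.getD (PySem.Dict.mk c) "entities" []

-- shared helper: {e.lower() for e in claim.get("entities") or []}
def pvClaimSet (c : List (String × List String)) : PySem.Set String :=
  PySem.Set.ofList ((pvEntsOf c).map PySem.Str.lower)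

-- ===== PORT A =====
-- {e.lower() for c in lg for e in (c.get("entities") or [])}, rebuilt fresh each time
def pvFresh (g : List (List (String × List String))) : PySem.Set String :=
  PySem.Set.ofList ((g.flatMap pvEntsOf).map PySem.Str.lower)

-- for i, lg in enumerate(large): rebuild lg's entity set, keep (best_overlap, best_idx)
def pvBestA (cents : PySem.Set String) :
    List (List (List (String × List String))) → Nat → Int × Nat → Int × Nat
  | [], _, acc => acc
  | lg :: rest, i, acc =>
    let group_entities := pvFresh lg
    let overlap : Int := ((PySem.Set.inter cents group_entities).length : Int)
    pvBestA cents rest (i + 1) (if acc.1 < overlap then (overlap, i) else acc)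

-- the body of A's loop over the small claims: pick best group, append the claim to it
def pvStepA (large : List (List (List (String × List String))))
    (claim : List (String × List String)) : List (List (List (String × List String))) :=
  let cents := pvClaimSet claim
  let best := (pvBestA cents large 0 (-1, 0)).2
  large.set best (large.getD best [] ++ [claim])

def merge_singletons_py (groups : List (List (List (String × List String)))) (min_size : Int) : List (List (List (String × List String))) :=
  let large := groups.filter (fun g => decide (min_size ≤ (g.length : Int)))
  let small := groups.filter (fun g => decide ((g.length : Int) < min_size))
  if large.isEmpty && !small.isEmpty then
    let all_small_claims := small.flatMap id
    if !all_small_claims.isEmpty then [all_small_claims] else []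
  else
    small.foldl (fun L group => group.foldl pvStepA L) large

-- ===== PORT B =====
-- for e in c.get("entities") or []: index.setdefault(e.lower(), set()).add(i)
-- (setdefault(k, set()).add(i) = store, at key k, the old set there — empty if absent — with i added)
def pvIndexAddClaim (i : Nat) (d : PySem.Dict String (PySem.Set Nat))
    (c : List (String × List String)) : PySem.Dict String (PySem.Set Nat) :=
  (pvEntsOf c).foldl
    (fun d e => PySem.Dict.insert d (PySem.Str.lower e)
      (PySem.Set.add (PySem.Dict.getD d (PySem.Str.lower e) []) i)) d

-- index = {}; for i, g in enumerate(large): for c in g: …  (enumerate indices are the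
-- nonnegative list positions, kept as Nat; zipIdx pairs each group with its position)
def pvBuildIndex (large : List (List (List (String × List String)))) :
    PySem.Dict String (PySem.Set Nat) :=
  large.zipIdx.foldl (fun d p => p.1.foldl (pvIndexAddClaim p.2) d) PySem.Dict.empty

-- counts = [0]*n; for e in ents: for i in index.get(e, ()): counts[i] += 1
-- (every posted index is a valid position of counts — see pvInv — so List.set is exact)
def pvCounts (d : PySem.Dict String (PySem.Set Nat)) (ents : PySem.Set String)
    (n : Nat) : List Int :=
  ents.foldl
    (fun counts e => (PySem.Dict.getD d e []).foldl
      (fun cs i => cs.set i (cs.getD i 0 + 1)) counts)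
    (List.replicate n 0)

-- body of Source B's claim loop; state = (large, inverted index). The .getD 0 fallbacks of
-- max?/index? are unreachable (large is non-empty whenever a small claim exists).
def pvStepB (st : List (List (List (String × List String))) × PySem.Dict String (PySem.Set Nat))
    (claim : List (String × List String)) :
    List (List (List (String × List String))) × PySem.Dict String (PySem.Set Nat) :=
  let ents := pvClaimSet claim
  let counts := pvCounts st.2 ents st.1.length
  let best := (PySem.List.index? counts ((PySem.List.max? counts (fun x => x)).getD 0)).getD 0
  (st.1.set best (st.1.getD best [] ++ [claim]),
   ents.foldl (fun d e => PySem.Dict.insert d e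
     (PySem.Set.add (PySem.Dict.getD d e []) best)) st.2)

def merge_singletons_py_alt (groups : List (List (List (String × List String)))) (min_size : Int) : List (List (List (String × List String))) :=
  let large := groups.filter (fun g => decide (min_size ≤ (g.length : Int)))
  let small := groups.filter (fun g => decide ((g.length : Int) < min_size))
  if large.isEmpty && !small.isEmpty then
    let all_small_claims := small.flatMap id
    if !all_small_claims.isEmpty then [all_small_claims] else []
  else
    ((small.flatMap id).foldl pvStepB (large, pvBuildIndex large)).1

-- ===== PRECONDITION & SPEC =====
def Spec_merge_singletons_py (groups : List (List (List (String × List String)))) (min_size : Int) (out : List (List (List (String × List String)))) : Prop := out = merge_singletons_py_alt groups min_size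
instance (groups : List (List (List (String × List String)))) (min_size : Int) (out : List (List (List (String × List String)))) : Decidable (Spec_merge_singletons_py groups min_size out) := by unfold Spec_merge_singletons_py; infer_instance

-- ===== CLAIM (what is proved, stated in full; the proofs are below) =====
def Claim_equal_merge_singletons_py : Prop := ∀ (groups : List (List (List (String × List String)))) (min_size : Int), Dom_merge_singletons_py groups min_size → Spec_merge_singletons_py groups min_size (merge_singletons_py groups min_size)

-- ===== LEMMAS AND PROOFS =====

-- ---- the index invariant: postings are exactly the groups whose entity set has the key ----
def pvInv (d : PySem.Dict String (PySem.Set Nat))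
    (L : List (List (List (String × List String)))) : Prop :=
  (∀ s, (PySem.Dict.getD d s []).Nodup) ∧
  (∀ s i, i ∈ PySem.Dict.getD d s [] ↔ ∃ h : i < L.length, s ∈ pvFresh L[i])

-- effect of one posting fold (any key list ks, one index i) on getD-membership and Nodup
theorem pvAddKeys_getD (i : Nat) (ks : List String) (d : PySem.Dict String (PySem.Set Nat))
    (hnd : ∀ s, (PySem.Dict.getD d s []).Nodup) :
    (∀ s, (PySem.Dict.getD (ks.foldl (fun d k => PySem.Dict.insert d k
        (PySem.Set.add (PySem.Dict.getD d k []) i)) d) s []).Nodup) ∧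
    (∀ s i', i' ∈ PySem.Dict.getD (ks.foldl (fun d k => PySem.Dict.insert d k
        (PySem.Set.add (PySem.Dict.getD d k []) i)) d) s []
      ↔ i' ∈ PySem.Dict.getD d s [] ∨ (s ∈ ks ∧ i' = i)) := by
  induction ks generalizing d with
  | nil => exact ⟨hnd, by simp⟩
  | cons k ks ih =>
    have hnd' : ∀ s, (PySem.Dict.getD (PySem.Dict.insert d k
        (PySem.Set.add (PySem.Dict.getD d k []) i)) s []).Nodup := by
      intro s
      rw [PySem.Dict.getD_insert]
      split
      · exact PySem.Set.nodup_add _ _ (hnd k)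
      · exact hnd s
    obtain ⟨h1, h2⟩ := ih _ hnd'
    refine ⟨h1, fun s i' => ?_⟩
    rw [List.foldl_cons] at *
    rw [h2 s i', PySem.Dict.getD_insert]
    by_cases hs : s = k
    · rw [if_pos hs, PySem.Set.mem_add]
      subst hs
      simp only [List.mem_cons]
      tauto
    · rw [if_neg hs]
      simp only [List.mem_cons]
      tauto

-- pvIndexAddClaim is that fold over the claim's lowercased entities
theorem pvIndexAddClaim_eq (i : Nat) (d : PySem.Dict String (PySem.Set Nat))
    (c : List (String × List String)) :
    pvIndexAddClaim i d c = ((pvEntsOf c).map PySem.Str.lower).foldl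
      (fun d k => PySem.Dict.insert d k (PySem.Set.add (PySem.Dict.getD d k []) i)) d := by
  rw [pvIndexAddClaim, List.foldl_map]

-- adding one whole group g with index i: membership gains exactly (s ∈ pvFresh g ∧ i' = i)
theorem pvAddGroup_getD (i : Nat) (g : List (List (String × List String)))
    (d : PySem.Dict String (PySem.Set Nat))
    (hnd : ∀ s, (PySem.Dict.getD d s []).Nodup) :
    (∀ s, (PySem.Dict.getD (g.foldl (pvIndexAddClaim i) d) s []).Nodup) ∧
    (∀ s i', i' ∈ PySem.Dict.getD (g.foldl (pvIndexAddClaim i) d) s []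
      ↔ i' ∈ PySem.Dict.getD d s [] ∨ (s ∈ pvFresh g ∧ i' = i)) := by
  induction g generalizing d with
  | nil => exact ⟨hnd, by simp [pvFresh]⟩
  | cons c g ih =>
    rw [List.foldl_cons, pvIndexAddClaim_eq]
    obtain ⟨ha, hb⟩ := pvAddKeys_getD i ((pvEntsOf c).map PySem.Str.lower) d hnd
    obtain ⟨h1, h2⟩ := ih _ ha
    refine ⟨h1, fun s i' => ?_⟩
    have hsplit : s ∈ pvFresh (c :: g) ↔ s ∈ (pvEntsOf c).map PySem.Str.lower ∨ s ∈ pvFresh g := by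
      simp [pvFresh, PySem.Set.mem_ofList, List.flatMap_cons]
    rw [h2 s i', hb s i', hsplit]
    tauto

-- the built index satisfies the invariant
theorem pvBuildIndex_inv (large : List (List (List (String × List String)))) :
    pvInv (pvBuildIndex large) large := by
  suffices h : ∀ L, pvInv (L.zipIdx.foldl (fun d p => p.1.foldl (pvIndexAddClaim p.2) d)
      PySem.Dict.empty) L by exact h large
  intro L
  induction L using List.reverseRecOn with
  | nil =>
    have he : ∀ s : String,
        PySem.Dict.getD (PySem.Dict.empty : PySem.Dict String (PySem.Set Nat)) s [] = [] :=
      fun s => rfl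
    constructor
    · intro s; simp only [List.zipIdx_nil, List.foldl_nil]; rw [he]; exact List.nodup_nil
    · intro s i; simp only [List.zipIdx_nil, List.foldl_nil]; rw [he]; simp
  | append_singleton L g ih =>
    rw [List.zipIdx_append, List.foldl_append]
    obtain ⟨hnd, hmem⟩ := ih
    simp only [List.zipIdx_cons, List.zipIdx_nil, Nat.zero_add, List.foldl_cons, List.foldl_nil]
    obtain ⟨h1, h2⟩ := pvAddGroup_getD L.length g _ hnd
    refine ⟨h1, fun s i => ?_⟩
    rw [h2 s i, hmem s i]
    constructor
    · rintro (⟨h, hs⟩ | ⟨hs, rfl⟩)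
      · exact ⟨by simp; omega, by rwa [List.getElem_append_left h]⟩
      · refine ⟨by simp, ?_⟩
        rw [List.getElem_append_right (le_refl _)]
        simpa using hs
    · rintro ⟨h, hs⟩
      by_cases hi : i < L.length
      · left; exact ⟨hi, by rwa [List.getElem_append_left hi] at hs⟩
      · right
        have : i = L.length := by simp at h; omega
        subst this
        refine ⟨?_, rfl⟩
        rw [List.getElem_append_right (le_refl _)] at hs
        simpa using hs

-- ---- counts computed from the index are A's overlaps ----

-- the inner `counts[i] += 1` fold, read back at a valid position
theorem pvIncList_getD (js : List Nat) (cs : List Int) (i : Nat) (hi : i < cs.length)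
    (hnd : js.Nodup) :
    (js.foldl (fun cs j => cs.set j (cs.getD j 0 + 1)) cs).getD i 0
      = cs.getD i 0 + (if i ∈ js then 1 else 0) := by
  induction js generalizing cs with
  | nil => simp
  | cons j js ih =>
    rw [List.foldl_cons]
    have hlen : (cs.set j (cs.getD j 0 + 1)).length = cs.length := by simp
    rw [ih _ (hlen ▸ hi) hnd.of_cons]
    by_cases hj : j = i
    · subst hj
      have hnotin : j ∉ js := by simp [List.nodup_cons] at hnd; exact hnd.1
      simp only [List.getD, List.getElem?_set, if_pos hi]
      simp [hnotin]
    · have : (cs.set j (cs.getD j 0 + 1)).getD i 0 = cs.getD i 0 := by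
        simp only [List.getD, List.getElem?_set, if_neg hj]
      rw [this]
      simp [Ne.symm hj]

theorem pvIncList_length (js : List Nat) (cs : List Int) :
    (js.foldl (fun cs j => cs.set j (cs.getD j 0 + 1)) cs).length = cs.length := by
  induction js generalizing cs with
  | nil => rfl
  | cons j js ih => rw [List.foldl_cons, ih]; simp

theorem pvCountsFold_length (d : PySem.Dict String (PySem.Set Nat)) (es : List String)
    (cs : List Int) :
    (es.foldl (fun counts e => (PySem.Dict.getD d e []).foldl
      (fun cs i => cs.set i (cs.getD i 0 + 1)) counts) cs).length = cs.length := by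
  induction es generalizing cs with
  | nil => rfl
  | cons e es ih => rw [List.foldl_cons, ih, pvIncList_length]

theorem pvCountsFold_getD (d : PySem.Dict String (PySem.Set Nat)) (es : List String)
    (cs : List Int) (i : Nat) (hi : i < cs.length)
    (hnd : ∀ s, (PySem.Dict.getD d s []).Nodup) :
    (es.foldl (fun counts e => (PySem.Dict.getD d e []).foldl
      (fun cs i => cs.set i (cs.getD i 0 + 1)) counts) cs).getD i 0
      = cs.getD i 0 + ((es.countP (fun e => decide (i ∈ PySem.Dict.getD d e []))) : Int) := by
  induction es generalizing cs with
  | nil => simp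
  | cons e es ih =>
    rw [List.foldl_cons]
    have hlen := pvIncList_length (PySem.Dict.getD d e []) cs
    rw [ih _ (hlen ▸ hi), pvIncList_getD _ _ _ hi (hnd e), List.countP_cons]
    by_cases hm : i ∈ PySem.Dict.getD d e []
    · simp [hm]
      ring
    · simp [hm]

-- overlap through the invariant: |cents & pvFresh L[i]| counted from the index
theorem pvSet_inter_length (s t : List String) :
    (PySem.Set.inter s t).length = s.countP (fun x => t.contains x) := by
  simp [PySem.Set.inter, List.countP_eq_length_filter]

theorem pvCounts_eq (d : PySem.Dict String (PySem.Set Nat))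
    (L : List (List (List (String × List String)))) (cents : PySem.Set String)
    (hinv : pvInv d L) :
    pvCounts d cents L.length
      = L.map (fun g => ((PySem.Set.inter cents (pvFresh g)).length : Int)) := by
  obtain ⟨hnd, hmem⟩ := hinv
  apply List.ext_getElem
  · rw [pvCounts, pvCountsFold_length]; simp
  · intro i h1 h2
    have hiL : i < L.length := by simpa using h2
    have hrep : i < (List.replicate L.length (0:Int)).length := by simpa using hiL
    have hgd : (pvCounts d cents L.length).getD i 0 = (pvCounts d cents L.length)[i] := by
      rw [List.getD_eq_getElem?_getD, List.getElem?_eq_getElem h1]; rfl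
    rw [← hgd, pvCounts, pvCountsFold_getD d cents _ i hrep hnd]
    have hdec : ∀ e, (decide (i ∈ PySem.Dict.getD d e [])) = ((pvFresh L[i]).contains e) := by
      intro e
      rw [PySem.Set.contains_eq_listContains, Bool.eq_iff_iff]
      simp [hmem e i, hiL]
    rw [List.countP_congr (fun e _ => by rw [hdec e])]
    have hmap : (List.map (fun g => ((PySem.Set.inter cents (pvFresh g)).length : Int)) L)[i]
        = ((PySem.Set.inter cents (pvFresh L[i])).length : Int) := by simp
    rw [hmap, pvSet_inter_length]
    have hz : (List.replicate L.length (0:Int)).getD i 0 = 0 := by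
      rw [List.getD_eq_getElem?_getD, List.getElem?_replicate, if_pos hiL]
      rfl
    rw [hz, zero_add]
    rfl

-- ---- A's running-max scan is "index of first maximum" ----

-- proof-side spine: A's scan over the precomputed overlap list
def pvScan : List Int → Nat → Int × Nat → Int × Nat
  | [], _, acc => acc
  | v :: rest, i, acc => pvScan rest (i + 1) (if acc.1 < v then (v, i) else acc)

theorem pvBestA_eq_scan (cents : PySem.Set String)
    (L : List (List (List (String × List String)))) (i : Nat) (acc : Int × Nat) :
    pvBestA cents L i acc
      = pvScan (L.map (fun g => ((PySem.Set.inter cents (pvFresh g)).length : Int))) i acc := by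
  induction L generalizing i acc with
  | nil => rfl
  | cons lg rest ih => simp [pvBestA, pvScan, ih]

theorem pvScan_append (xs ys : List Int) (i : Nat) (acc : Int × Nat) :
    pvScan (xs ++ ys) i acc = pvScan ys (i + xs.length) (pvScan xs i acc) := by
  induction xs generalizing i acc with
  | nil => simp [pvScan]
  | cons v xs ih =>
    simp only [List.cons_append, pvScan, ih]
    congr 1
    simp only [List.length_cons]
    omega

theorem pvScan_argmax (ov : List Int) (hne : ov ≠ []) (hpos : ∀ v ∈ ov, 0 ≤ v) :
    pvScan ov 0 (-1, 0)
      = ((PySem.List.max? ov (fun x => x)).getD 0,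
         (PySem.List.index? ov ((PySem.List.max? ov (fun x => x)).getD 0)).getD 0) := by
  induction ov using List.reverseRecOn with
  | nil => exact absurd rfl hne
  | append_singleton xs v ih =>
    rcases List.eq_nil_or_concat' xs with rfl | ⟨ys, y, rfl⟩
    · have h0 : (0:Int) ≤ v := hpos v (by simp)
      simp only [List.nil_append, pvScan]
      rw [PySem.List.max?_id_cons]
      simp only [List.foldl_nil, Option.getD_some]
      rw [PySem.List.index?_cons_self, if_pos (by omega : (-1:Int) < v)]
      simp
    · -- xs ≠ []
      have hxs : (ys ++ [y]) ≠ [] := by simp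
      have hpos' : ∀ w ∈ ys ++ [y], 0 ≤ w := fun w hw => hpos w (by simp at hw ⊢; tauto)
      have ihx := ih hxs hpos'
      -- the max of xs as a some
      obtain ⟨m, hm⟩ : ∃ m, PySem.List.max? (ys ++ [y]) (fun x => x) = some m := by
        cases h : PySem.List.max? (ys ++ [y]) (fun x => x) with
        | none => rw [PySem.List.max?_eq_none_iff] at h; exact absurd h hxs
        | some m => exact ⟨m, rfl⟩
      have hmmem : m ∈ ys ++ [y] := PySem.List.max?_mem hm
      have hmmax : ∀ w ∈ ys ++ [y], w ≤ m := by
        intro w hw; exact PySem.List.max?_isMax hm w hw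
      rw [pvScan_append, ihx, hm]
      simp only [Option.getD_some, pvScan]
      -- max of the appended list
      have hmax_app : PySem.List.max? ((ys ++ [y]) ++ [v]) (fun x => x) = some (max m v) := by
        obtain ⟨z, zs, hzs⟩ := List.exists_cons_of_ne_nil hxs
        rw [hzs] at hm ⊢
        rw [List.cons_append, PySem.List.max?_id_cons]
        rw [PySem.List.max?_id_cons] at hm
        simp only [Option.some.injEq] at hm
        simp [List.foldl_append, hm]
      by_cases hlt : m < v
      · have hvnotin : v ∉ ys ++ [y] := fun hv => absurd (hmmax v hv) (by omega)
        rw [if_pos hlt, hmax_app]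
        have hmv : max m v = v := by omega
        rw [hmv]
        simp only [Option.getD_some]
        rw [PySem.List.index?_append_singleton_self _ v hvnotin]
        simp
      · rw [if_neg hlt, hmax_app]
        have hmv : max m v = m := by omega
        rw [hmv]
        simp only [Option.getD_some]
        rw [PySem.List.index?_append_of_mem [v] hmmem]

-- ---- the two loop bodies agree and preserve the invariant ----

theorem pvStepB_eq (L : List (List (List (String × List String))))
    (d : PySem.Dict String (PySem.Set Nat)) (claim : List (String × List String))
    (hL : L ≠ []) (hinv : pvInv d L) :
    pvStepB (L, d) claim = (pvStepA L claim,
      (pvClaimSet claim).foldl (fun d e => PySem.Dict.insert d e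
        (PySem.Set.add (PySem.Dict.getD d e []) ((pvBestA (pvClaimSet claim) L 0 (-1,0)).2))) d) := by
  have hcounts := pvCounts_eq d L (pvClaimSet claim) hinv
  have hov_ne : L.map (fun g => ((PySem.Set.inter (pvClaimSet claim) (pvFresh g)).length : Int)) ≠ [] := by
    simpa using hL
  have hov_pos : ∀ v ∈ L.map (fun g => ((PySem.Set.inter (pvClaimSet claim) (pvFresh g)).length : Int)), 0 ≤ v := by
    intro v hv
    simp at hv
    obtain ⟨g, _, rfl⟩ := hv
    positivity
  have hbest : (pvBestA (pvClaimSet claim) L 0 (-1,0)).2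
      = (PySem.List.index? (pvCounts d (pvClaimSet claim) L.length)
          ((PySem.List.max? (pvCounts d (pvClaimSet claim) L.length) (fun x => x)).getD 0)).getD 0 := by
    rw [hcounts, pvBestA_eq_scan, pvScan_argmax _ hov_ne hov_pos]
  simp only [pvStepB, pvStepA]
  rw [← hbest]

-- appending a claim at a valid index preserves the invariant with the posted entities
theorem pvInv_step (L : List (List (List (String × List String))))
    (d : PySem.Dict String (PySem.Set Nat)) (claim : List (String × List String))
    (b : Nat) (hb : b < L.length) (hinv : pvInv d L) :
    pvInv ((pvClaimSet claim).foldl (fun d e => PySem.Dict.insert d e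
        (PySem.Set.add (PySem.Dict.getD d e []) b)) d)
      (L.set b (L.getD b [] ++ [claim])) := by
  obtain ⟨hnd, hmem⟩ := hinv
  obtain ⟨h1, h2⟩ := pvAddKeys_getD b (pvClaimSet claim) d hnd
  refine ⟨h1, fun s i => ?_⟩
  rw [h2 s i]
  have hgd : L.getD b [] = L[b] := by
    rw [List.getD_eq_getElem?_getD, List.getElem?_eq_getElem hb]; rfl
  have hfresh : ∀ x, x ∈ pvFresh (L[b] ++ [claim]) ↔ x ∈ pvFresh L[b] ∨ x ∈ pvClaimSet claim := by
    intro x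
    simp [pvFresh, pvClaimSet, PySem.Set.mem_ofList]
  constructor
  · rintro (h | ⟨hs, rfl⟩)
    · obtain ⟨hi, hs⟩ := (hmem s i).1 h
      refine ⟨by simpa using hi, ?_⟩
      by_cases hib : i = b
      · subst hib
        rw [List.getElem_set_self, hgd, hfresh]
        exact Or.inl hs
      · rwa [List.getElem_set_ne (Ne.symm hib)]
    · refine ⟨by simpa using hb, ?_⟩
      rw [List.getElem_set_self, hgd, hfresh]
      exact Or.inr hs
  · rintro ⟨hi, hs⟩
    have hi' : i < L.length := by simpa using hi
    by_cases hib : i = b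
    · subst hib
      rw [List.getElem_set_self, hgd, hfresh] at hs
      rcases hs with hs | hs
      · exact Or.inl ((hmem s i).2 ⟨hi', hs⟩)
      · exact Or.inr ⟨hs, rfl⟩
    · rw [List.getElem_set_ne (Ne.symm hib)] at hs
      exact Or.inl ((hmem s i).2 ⟨hi', hs⟩)

-- bestA is always a valid index of a non-empty large list
theorem pvBestA_lt (cents : PySem.Set String)
    (L : List (List (List (String × List String)))) (hL : L ≠ []) :
    (pvBestA cents L 0 (-1,0)).2 < L.length := by
  have hov_ne : L.map (fun g => ((PySem.Set.inter cents (pvFresh g)).length : Int)) ≠ [] := by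
    simpa using hL
  have hov_pos : ∀ v ∈ L.map (fun g => ((PySem.Set.inter cents (pvFresh g)).length : Int)), 0 ≤ v := by
    intro v hv
    simp at hv
    obtain ⟨g, _, rfl⟩ := hv
    positivity
  rw [pvBestA_eq_scan, pvScan_argmax _ hov_ne hov_pos]
  set ov := L.map (fun g => ((PySem.Set.inter cents (pvFresh g)).length : Int)) with hov
  obtain ⟨m, hm⟩ : ∃ m, PySem.List.max? ov (fun x => x) = some m := by
    cases h : PySem.List.max? ov (fun x => x) with
    | none => rw [PySem.List.max?_eq_none_iff] at h; exact absurd h hov_ne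
    | some m => exact ⟨m, rfl⟩
  obtain ⟨k, hk⟩ : ∃ k, PySem.List.index? ov m = some k := by
    cases h : PySem.List.index? ov m with
    | none => rw [PySem.List.index?_eq_none_iff] at h; exact absurd (PySem.List.max?_mem hm) h
    | some k => exact ⟨k, rfl⟩
  obtain ⟨hklt, -, -⟩ := PySem.List.getElem_of_index?_eq_some hk
  rw [hm]
  simp only [Option.getD_some, hk]
  simp only [hov, List.length_map] at hklt
  simpa using hklt

-- ---- the whole B loop tracks the A loop ----
theorem pvFold_eq (claims : List (List (String × List String)))
    (L : List (List (List (String × List String))))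
    (d : PySem.Dict String (PySem.Set Nat)) (hL : L ≠ []) (hinv : pvInv d L) :
    (claims.foldl pvStepB (L, d)).1 = claims.foldl pvStepA L := by
  induction claims generalizing L d with
  | nil => rfl
  | cons c cs ih =>
    rw [List.foldl_cons, List.foldl_cons, pvStepB_eq L d c hL hinv]
    have hb := pvBestA_lt (pvClaimSet c) L hL
    have hL' : pvStepA L c ≠ [] := by
      simp only [pvStepA]
      intro h
      have := congrArg List.length h
      simp at this
      exact hL this
    exact ih _ _ hL' (pvInv_step L d c _ hb hinv)

-- A's nested for-loops are one loop over the flattened claims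
theorem pvNested_flat (small : List (List (List (String × List String))))
    (L : List (List (List (String × List String)))) :
    small.foldl (fun L group => group.foldl pvStepA L) L
      = (small.flatMap id).foldl pvStepA L := by
  induction small generalizing L with
  | nil => rfl
  | cons g gs ih => simp [List.flatMap_cons, List.foldl_append, ih]

-- ===== VERDICT (by name: the statement is the Claim_ definition above) =====
theorem merge_singletons_py_spec : Claim_equal_merge_singletons_py := by
  intro groups min_size _
  unfold Spec_merge_singletons_py merge_singletons_py merge_singletons_py_alt
  simp only []
  split
  · rfl
  · rename_i hcond
    rw [pvNested_flat]
    rcases hflat : (groups.filter (fun g => decide ((g.length : Int) < min_size))).flatMap id with _ | ⟨c, cs⟩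
    · rw [hflat]
      rfl
    · have hsmall_ne : groups.filter (fun g => decide ((g.length : Int) < min_size)) ≠ [] := by
        intro h
        rw [h] at hflat
        simp at hflat
      have hlarge_ne : groups.filter (fun g => decide (min_size ≤ (g.length : Int))) ≠ [] := by
        intro h
        apply hcond
        simp [h, hsmall_ne]
      exact (pvFold_eq _ _ _ hlarge_ne (pvBuildIndex_inv _)).symm
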